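-- pv_equiv track=rewrite | github.com/sskender/analysis-of-massive-datasets | lab1/SimHashBuckets.py | hamming_distance_threshold
-- ===== SOURCE A (Python) =====
-- def hamming_distance_threshold(hash1, hash2, K):
--     # convert hex 1 to bits
--     bits1 = bin(int(hash1, 16))[2:]
--     bits1 = bits1.rjust(128, "0")
--     # convert hex 2 to bits
--     bits2 = bin(int(hash2, 16))[2:]
--     bits2 = bits2.rjust(128, "0")
--     # calculate hamming distance
--     hamming_distance = 0
--     for i, j in zip(bits1, bits2):
--         if i != j:
--             hamming_distance += 1
--             if hamming_distance > K:
--                 return False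
--     if hamming_distance > K:
--         return False
--     return True
-- ===== SOURCE B (Python) =====
-- def hamming_distance_threshold(hash1, hash2, K):
--     x = int(hash1, 16) ^ int(hash2, 16)
--     return x.bit_count() <= K
-- ===== Notes on version B (the rewrite author's own statement) =====
-- stated objective: idiomatic
-- what changed: B XORs the two hex values as integers and compares the popcount (int.bit_count) against K, replacing A's construction of two 128-character zero-padded binary strings and the per-character zip loop with early exit.
-- outside the precondition, e.g. on hamming_distance_threshold('-2', '1', 1): A returns False, B returns True
import Mathlib
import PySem

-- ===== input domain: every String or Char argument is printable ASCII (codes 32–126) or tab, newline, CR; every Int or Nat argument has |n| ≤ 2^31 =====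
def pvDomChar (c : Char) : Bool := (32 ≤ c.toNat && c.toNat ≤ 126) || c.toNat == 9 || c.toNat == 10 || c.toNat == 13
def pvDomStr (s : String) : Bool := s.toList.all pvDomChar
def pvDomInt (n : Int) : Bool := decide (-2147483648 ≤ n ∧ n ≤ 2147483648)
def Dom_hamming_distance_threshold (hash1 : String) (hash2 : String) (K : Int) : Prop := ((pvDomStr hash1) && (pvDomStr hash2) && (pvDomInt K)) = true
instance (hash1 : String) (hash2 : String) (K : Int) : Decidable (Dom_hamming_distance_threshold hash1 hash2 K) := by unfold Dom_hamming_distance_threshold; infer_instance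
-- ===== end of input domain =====

-- B replaces A's padded-binary-string zip loop by an integer XOR and popcount (int.bit_count) comparison.


-- ===== PORT A =====
-- s.rjust(128, "0"): exact for these inputs (pad on the left with '0'; no sign handling in rjust)
def pvRjust128 (cs : List Char) : List Char := List.replicate (128 - cs.length) '0' ++ cs

-- the 'for i, j in zip(bits1, bits2)' loop with its early 'return False', then the trailing check
def pvHamLoop : List (Char × Char) → Int → Int → Bool
  | [], hd, K => !(hd > K)
  | (i, j) :: rest, hd, K =>
    if i != j then
      if hd + 1 > K then false else pvHamLoop rest (hd + 1) K
    else pvHamLoop rest hd K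

def hamming_distance_threshold (hash1 : String) (hash2 : String) (K : Int) : Bool :=
  match PySem.Int.ofStrBase? hash1 16 with
  | none => false  -- int(hash1, 16) raises ValueError: outside Pre_
  | some n1 =>
    let bits1 := pvRjust128 (PySem.List.slice (PySem.Int.toBinChars0b n1) (some 2) none)  -- bin(...)[2:].rjust(128,"0")
    match PySem.Int.ofStrBase? hash2 16 with
    | none => false  -- int(hash2, 16) raises ValueError: outside Pre_
    | some n2 =>
      let bits2 := pvRjust128 (PySem.List.slice (PySem.Int.toBinChars0b n2) (some 2) none)
      pvHamLoop (bits1.zip bits2) 0 K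

-- ===== PORT B =====
def hamming_distance_threshold_alt (hash1 : String) (hash2 : String) (K : Int) : Bool :=
  match PySem.Int.ofStrBase? hash1 16, PySem.Int.ofStrBase? hash2 16 with
  | some a, some b => decide ((PySem.Int.bitCount (PySem.Int.bxor a b) : Int) ≤ K)  -- x.bit_count() <= K
  | _, _ => false

-- ===== PRECONDITION & SPEC =====
def pvHexOk (o : Option Int) : Bool :=
  match o with
  | some n => decide (0 ≤ n ∧ n < 2 ^ 128)
  | none => false

-- Pre_ excludes (a) strings int(·,16) rejects, where A raises ValueError, and (b) strings denoting a
-- negative value (bin() emits a sign, so A compares leftover 'b'/'-' characters) or a value ≥ 2^128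
-- (A's zip silently truncates the misaligned bit strings) — both accidents of A's 128-bit padding.
def Pre_hamming_distance_threshold (hash1 : String) (hash2 : String) (K : Int) : Prop :=
  pvHexOk (PySem.Int.ofStrBase? hash1 16) = true ∧ pvHexOk (PySem.Int.ofStrBase? hash2 16) = true
instance (hash1 : String) (hash2 : String) (K : Int) : Decidable (Pre_hamming_distance_threshold hash1 hash2 K) := by unfold Pre_hamming_distance_threshold; infer_instance

def pvWitness_hamming_distance_threshold : String × String × Int := ("a3", "0b", 3)

def Spec_hamming_distance_threshold (hash1 : String) (hash2 : String) (K : Int) (out : Bool) : Prop := out = hamming_distance_threshold_alt hash1 hash2 K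
instance (hash1 : String) (hash2 : String) (K : Int) (out : Bool) : Decidable (Spec_hamming_distance_threshold hash1 hash2 K out) := by unfold Spec_hamming_distance_threshold; infer_instance

-- ===== CLAIM (what is proved, stated in full; the proofs are below) =====
def Claim_equal_hamming_distance_threshold : Prop := ∀ (hash1 : String) (hash2 : String) (K : Int), Dom_hamming_distance_threshold hash1 hash2 K → Pre_hamming_distance_threshold hash1 hash2 K → Spec_hamming_distance_threshold hash1 hash2 K (hamming_distance_threshold hash1 hash2 K)

-- ===== LEMMAS AND PROOFS =====

-- binary digits of n, MSB first (what Nat.toDigits 2 computes, in a shape fit for induction)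
def binS : Nat → List Char
  | n =>
    if _h : n < 2 then [Nat.digitChar n]
    else binS (n / 2) ++ [Nat.digitChar (n % 2)]
  decreasing_by exact Nat.div_lt_self (by omega) (by omega)

-- the low w bits of n, MSB first
def bitsW : Nat → Nat → List Char
  | 0, _ => []
  | w + 1, n => bitsW w (n / 2) ++ [Nat.digitChar (n % 2)]

lemma toDigitsCore_eq_binS (fuel : Nat) : ∀ (n : Nat) (ds : List Char), n < fuel →
    Nat.toDigitsCore 2 fuel n ds = binS n ++ ds := by
  induction fuel with
  | zero => intro n ds h; omega
  | succ f ih =>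
    intro n ds h
    rw [Nat.toDigitsCore.eq_def, binS]
    by_cases h2 : n < 2
    · have : n / 2 = 0 := by omega
      have hm : n % 2 = n := by omega
      simp [this, h2, hm]
    · have : ¬ n / 2 = 0 := by omega
      simp only [this, if_false, dif_neg h2]
      rw [ih (n / 2) _ (by omega)]
      simp

lemma toDigits_two_eq (n : Nat) : Nat.toDigits 2 n = binS n := by
  rw [Nat.toDigits, toDigitsCore_eq_binS (n + 1) n [] (by omega), List.append_nil]

lemma length_bitsW (w n : Nat) : (bitsW w n).length = w := by
  induction w generalizing n with
  | zero => rfl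
  | succ w ih => simp [bitsW, ih]

lemma bitsW_zero (w : Nat) : bitsW w 0 = List.replicate w '0' := by
  induction w with
  | zero => rfl
  | succ w ih =>
    rw [bitsW, ih]
    simp [List.replicate_succ', Nat.digitChar]

-- rjust-to-width of the binary digits is exactly the low bits, when the value fits
lemma pad_binS (w : Nat) : ∀ m : Nat, m < 2 ^ (w + 1) →
    List.replicate ((w + 1) - (binS m).length) '0' ++ binS m = bitsW (w + 1) m := by
  induction w with
  | zero =>
    intro m hm
    have h2 : m < 2 := by omega
    rw [binS, dif_pos h2, bitsW, bitsW]
    have hmod : m % 2 = m := by omega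
    simp [hmod]
  | succ w ih =>
    intro m hm
    by_cases h2 : m < 2
    · rw [binS, dif_pos h2, bitsW]
      have h0 : m / 2 = 0 := by omega
      have hmod : m % 2 = m := by omega
      rw [h0, bitsW_zero, hmod]
      simp [List.replicate_succ']
    · rw [binS, dif_neg h2, bitsW]
      have ihm := ih (m / 2) (by omega)
      rw [← ihm]
      simp only [List.length_append, List.length_singleton]
      rw [show (w + 1 + 1) - ((binS (m / 2)).length + 1) = (w + 1) - (binS (m / 2)).length by omega]
      simp

-- the loop returns exactly 'total mismatch count ≤ K'
lemma hamLoop_eq (zs : List (Char × Char)) : ∀ (hd K : Int),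
    pvHamLoop zs hd K = decide (hd + (zs.countP fun p => p.1 != p.2) ≤ K) := by
  induction zs with
  | nil =>
    intro hd K
    simp only [pvHamLoop, List.countP_nil, Nat.cast_zero, add_zero]
    by_cases h : K < hd
    · have h2 : ¬ (hd ≤ K) := by omega
      simp [h, h2]
    · have h2 : hd ≤ K := by omega
      simp [h, h2]
  | cons z rest ih =>
    intro hd K
    obtain ⟨i, j⟩ := z
    rw [pvHamLoop]
    by_cases hij : (i != j) = true
    · rw [if_pos hij]
      have hc : (((i, j) :: rest).countP fun p => p.1 != p.2) =
          (rest.countP fun p => p.1 != p.2) + 1 := by simp [hij]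
      rw [hc]
      by_cases hK : hd + 1 > K
      · rw [if_pos hK]
        symm; simp only [decide_eq_false_iff_not]; push_cast; omega
      · rw [if_neg hK, ih, decide_eq_decide]
        push_cast
        omega
    · rw [if_neg hij]
      have hc : (((i, j) :: rest).countP fun p => p.1 != p.2) =
          rest.countP fun p => p.1 != p.2 := by simp [hij]
      rw [hc, ih]

-- digitChar is injective on single bits
lemma digitChar_bit_eq_iff (a b : Nat) :
    ((a % 2).digitChar = (b % 2).digitChar) ↔ a % 2 = b % 2 := by
  have ha : a % 2 = 0 ∨ a % 2 = 1 := by omega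
  have hb : b % 2 = 0 ∨ b % 2 = 1 := by omega
  rcases ha with ha | ha <;> rcases hb with hb | hb <;> rw [ha, hb] <;> decide

-- mismatch count over the zipped padded bit strings = popcount of the xor
lemma count_bitsW (w : Nat) : ∀ a b : Nat, a < 2 ^ w → b < 2 ^ w →
    (((bitsW w a).zip (bitsW w b)).countP fun p => p.1 != p.2) =
      PySem.Int.bitCount ((a ^^^ b : Nat) : Int) := by
  induction w with
  | zero =>
    intro a b ha hb
    have : a = 0 ∧ b = 0 := by omega
    simp [bitsW, this.1, this.2]
  | succ w ih =>
    intro a b ha hb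
    rw [bitsW, bitsW, List.zip_append (by rw [length_bitsW, length_bitsW]),
      List.countP_append, ih (a / 2) (b / 2) (by omega) (by omega)]
    have hone : (List.countP (fun p => p.1 != p.2)
        ([(a % 2).digitChar].zip [(b % 2).digitChar])) = if a % 2 = b % 2 then 0 else 1 := by
      by_cases hab : a % 2 = b % 2 <;>
        simp [bne_iff_ne, digitChar_bit_eq_iff, hab]
    rw [hone]
    have hdiv := Nat.xor_div_two (a := a) (b := b)
    have hmod := Nat.xor_mod_two_eq (m := a) (n := b)
    by_cases hx : a ^^^ b = 0
    · have hd2 : a / 2 ^^^ b / 2 = 0 := by omega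
      have hab : a % 2 = b % 2 := by omega
      rw [hx, hd2, if_pos hab]
      simp
    · rw [PySem.Int.bitCount_natCast (by omega : 0 < a ^^^ b), hdiv]
      by_cases hab : a % 2 = b % 2
      · rw [if_pos hab]
        have h0 : (a ^^^ b) % 2 = 0 := by omega
        omega
      · rw [if_neg hab]
        have h1 : (a ^^^ b) % 2 = 1 := by omega
        omega

-- A's padded bit string for an in-range value, end to end
lemma bits_of_val (m : Nat) (hm : m < 2 ^ 128) :
    pvRjust128 (PySem.List.slice (PySem.Int.toBinChars0b (m : Int)) (some 2) none) =
      bitsW 128 m := by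
  have h0 : ¬ ((m : Int) < 0) := by omega
  rw [show ((2 : Int) = ((2 : Nat) : Int)) by rfl, PySem.List.slice_from_natCast]
  rw [PySem.Int.toBinChars0b]
  simp only [h0, if_false, Int.toNat_natCast]
  rw [List.drop_succ_cons, List.drop_succ_cons, List.drop_zero, toDigits_two_eq]
  exact pad_binS 127 m hm

-- ===== VERDICT (by name: the statement is the Claim_ definition above) =====
theorem hamming_distance_threshold_spec : Claim_equal_hamming_distance_threshold := by
  intro hash1 hash2 K _ hpre
  obtain ⟨h1, h2⟩ := hpre
  unfold Spec_hamming_distance_threshold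
  unfold hamming_distance_threshold hamming_distance_threshold_alt
  unfold pvHexOk at h1 h2
  cases e1 : PySem.Int.ofStrBase? hash1 16 with
  | none => simp [e1] at h1
  | some n1 =>
    cases e2 : PySem.Int.ofStrBase? hash2 16 with
    | none => simp [e2] at h2
    | some n2 =>
      rw [e1] at h1; rw [e2] at h2
      simp only [decide_eq_true_eq] at h1 h2
      obtain ⟨h1n, h1b⟩ := h1
      obtain ⟨h2n, h2b⟩ := h2
      simp only
      obtain ⟨m1, rfl⟩ : ∃ m : Nat, n1 = (m : Int) := ⟨n1.toNat, (Int.toNat_of_nonneg h1n).symm⟩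
      obtain ⟨m2, rfl⟩ : ∃ m : Nat, n2 = (m : Int) := ⟨n2.toNat, (Int.toNat_of_nonneg h2n).symm⟩
      have hm1 : m1 < 2 ^ 128 := by exact_mod_cast h1b
      have hm2 : m2 < 2 ^ 128 := by exact_mod_cast h2b
      rw [bits_of_val m1 hm1, bits_of_val m2 hm2, hamLoop_eq,
        count_bitsW 128 m1 m2 hm1 hm2, PySem.Int.bxor_natCast]
      simp
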